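-- pv_equiv track=rewrite | github.com/Tuttotorna/lon-mirror | stress_tests/stress_test_iriguchi.py | control_set_same_local_exclusions
-- ===== SOURCE A (Python) =====
-- import math
-- from typing import Dict, List, Tuple
--
-- def is_prime(n: int) -> bool:
--     if n < 2:
--         return False
--     if n in (2, 3):
--         return True
--     if n % 2 == 0:
--         return False
--     r = int(math.isqrt(n))
--     f = 3
--     while f <= r:
--         if n % f == 0:
--             return False
--         f += 2
--     return True
--
-- def control_set_same_local_exclusions(primes: List[int], n_min: int, n_max: int) -> List[int]:
--     """
--     Control set: numbers that share the same local exclusions as primes: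
--     - exclude multiples of small primes (2,3,5) to match the obvious sieve structure.
--     This is a cheap proxy for "same local exclusions" without claiming equivalence.
--     """
--     out = []
--     for n in range(n_min, n_max + 1):
--         if n < 2:
--             continue
--         if n % 2 == 0 or n % 3 == 0 or n % 5 == 0:
--             continue
--         if not is_prime(n):
--             out.append(n)
--     return out
-- ===== SOURCE B (Python) =====
-- import math
--
-- # Segmented sieve of Eratosthenes over [max(n_min,2), n_max]: instead of trial-
-- # dividing each number, every divisor p up to isqrt(n_max) marks its multiples
-- # (from max(p*p, first multiple >= lo)) in a byte array; the answer is the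
-- # unmarked-complement: marked numbers coprime to 2, 3 and 5.
--
-- def control_set_same_local_exclusions(primes, n_min, n_max):
--     lo = max(n_min, 2)
--     if n_max < lo:
--         return []
--     comp = bytearray(n_max - lo + 1)
--     for p in range(2, math.isqrt(n_max) + 1):
--         start = max(p * p, ((lo + p - 1) // p) * p)
--         for m in range(start, n_max + 1, p):
--             comp[m - lo] = 1
--     return [n for n in range(lo, n_max + 1)
--             if n % 2 and n % 3 and n % 5 and comp[n - lo]]
-- ===== Notes on version B (the rewrite author's own statement) =====
-- stated objective: faster
-- what changed: B replaces A's per-number trial division (isqrt-bounded odd-divisor loop for every candidate) by a segmented sieve of Eratosthenes: every divisor p up to isqrt(n_max) marks its multiples in a byte array over [max(n_min,2), n_max], and the output is the marked numbers coprime to 2, 3 and 5.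
import Mathlib
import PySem

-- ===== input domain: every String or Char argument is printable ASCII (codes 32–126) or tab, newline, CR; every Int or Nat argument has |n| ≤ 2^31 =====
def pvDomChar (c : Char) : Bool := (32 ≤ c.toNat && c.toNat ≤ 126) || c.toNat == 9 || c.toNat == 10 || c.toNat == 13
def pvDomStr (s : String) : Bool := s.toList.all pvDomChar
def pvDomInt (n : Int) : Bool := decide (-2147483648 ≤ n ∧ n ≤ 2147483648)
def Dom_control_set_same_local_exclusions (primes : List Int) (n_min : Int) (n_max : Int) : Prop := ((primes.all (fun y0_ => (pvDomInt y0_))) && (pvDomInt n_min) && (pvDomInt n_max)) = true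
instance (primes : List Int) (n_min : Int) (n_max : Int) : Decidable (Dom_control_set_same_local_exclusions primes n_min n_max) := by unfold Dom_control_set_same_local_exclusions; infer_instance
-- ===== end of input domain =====

-- B replaces A's per-number trial division by a segmented sieve of Eratosthenes
-- (every divisor p up to isqrt(n_max) marks its multiples over [max(n_min,2), n_max]);
-- objective: faster (measured).

-- ===== PORT A =====

-- int(math.isqrt(n)) — exact for n ≥ 0 (A only calls it with n ≥ 7)
def pvIsqrt (n : Int) : Int := ((Nat.sqrt n.toNat : Nat) : Int)

-- the 'while f <= r' trial-division loop of is_prime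
def isPrimeLoop (n r f : Int) : Bool :=
  if h : f ≤ r then
    (if n % f = 0 then false else isPrimeLoop n r (f + 2))
  else true
termination_by (r + 1 - f).toNat
decreasing_by omega

def is_prime (n : Int) : Bool :=
  if n < 2 then false
  else if n = 2 ∨ n = 3 then true
  else if n % 2 = 0 then false
  else isPrimeLoop n (pvIsqrt n) 3

def control_set_same_local_exclusions (primes : List Int) (n_min : Int) (n_max : Int) : List Int :=
  (PySem.List.pyRange n_min (n_max + 1) 1).foldl
    (fun out n =>
      if n < 2 then out
      else if n % 2 = 0 ∨ n % 3 = 0 ∨ n % 5 = 0 then out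
      else if !is_prime n then out ++ [n] else out) []

-- ===== PORT B =====

-- start = max(p*p, ((lo + p - 1) // p) * p)
def sieveStart (lo p : Int) : Int :=
  max (p * p) ((PySem.Int.floordiv (lo + p - 1) p) * p)

-- comp = bytearray(n_max - lo + 1) with the two nested marking loops
-- (comp[m - lo] = 1 is a Bool write at index m - lo; all writes are in bounds)
def pvSieve (lo n_max : Int) : Array Bool :=
  (PySem.List.pyRange 2 (pvIsqrt n_max + 1) 1).foldl
    (fun comp p =>
      (PySem.List.pyRange (sieveStart lo p) (n_max + 1) p).foldl
        (fun c m => c.setIfInBounds (m - lo).toNat true) comp)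
    (Array.replicate (n_max - lo + 1).toNat false)

def control_set_same_local_exclusions_alt (primes : List Int) (n_min : Int) (n_max : Int) : List Int :=
  let lo := max n_min 2
  if n_max < lo then []
  else
    (PySem.List.pyRange lo (n_max + 1) 1).filter
      (fun n => (n % 2 != 0) && (n % 3 != 0) && (n % 5 != 0) &&
        (pvSieve lo n_max).getD (n - lo).toNat false)

-- ===== PRECONDITION & SPEC =====
def Spec_control_set_same_local_exclusions (primes : List Int) (n_min : Int) (n_max : Int) (out : List Int) : Prop := out = control_set_same_local_exclusions_alt primes n_min n_max
instance (primes : List Int) (n_min : Int) (n_max : Int) (out : List Int) : Decidable (Spec_control_set_same_local_exclusions primes n_min n_max out) := by unfold Spec_control_set_same_local_exclusions; infer_instance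

-- ===== CLAIM (what is proved, stated in full; the proofs are below) =====
def Claim_equal_control_set_same_local_exclusions : Prop := ∀ (primes : List Int) (n_min : Int) (n_max : Int), Dom_control_set_same_local_exclusions primes n_min n_max → Spec_control_set_same_local_exclusions primes n_min n_max (control_set_same_local_exclusions primes n_min n_max)

-- ===== LEMMAS AND PROOFS =====

-- A's per-element keep condition, read off its loop body
def pA (n : Int) : Bool :=
  if n < 2 then false
  else if n % 2 = 0 ∨ n % 3 = 0 ∨ n % 5 = 0 then false
  else !is_prime n

lemma le_pvIsqrt_iff (n g : Int) (hn : 0 ≤ n) (hg : 0 ≤ g) :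
    g ≤ pvIsqrt n ↔ g * g ≤ n := by
  unfold pvIsqrt
  have hgg : ((g.toNat : Nat) : Int) = g := by omega
  have hnn : ((n.toNat : Nat) : Int) = n := by omega
  constructor
  · intro h
    have h1 : g.toNat ≤ Nat.sqrt n.toNat := by omega
    have h2 := Nat.sqrt_le' n.toNat
    rw [pow_two] at h2
    have h3 : g.toNat * g.toNat ≤ n.toNat := le_trans (Nat.mul_le_mul h1 h1) h2
    have h4 : ((g.toNat * g.toNat : Nat) : Int) ≤ ((n.toNat : Nat) : Int) := Int.ofNat_le.mpr h3
    push_cast at h4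
    rw [hgg, hnn] at h4
    exact h4
  · intro h
    have h4 : ((g.toNat : Nat) : Int) * ((g.toNat : Nat) : Int) ≤ ((n.toNat : Nat) : Int) := by
      rw [hgg, hnn]; exact h
    have h3 : g.toNat * g.toNat ≤ n.toNat := by exact_mod_cast h4
    have h5 : g.toNat ≤ Nat.sqrt n.toNat := Nat.le_sqrt'.mpr (by rw [pow_two]; exact h3)
    omega

-- characterisation of A's trial-division loop
lemma isPrimeLoop_false_iff (n r : Int) :
    ∀ (k : Nat) (f : Int), (r + 1 - f).toNat = k →
      (isPrimeLoop n r f = false ↔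
        ∃ g, f ≤ g ∧ g ≤ r ∧ (g - f) % 2 = 0 ∧ n % g = 0) := by
  intro k
  induction k using Nat.strong_induction_on with
  | _ k IH =>
    intro f hk
    rw [isPrimeLoop]
    by_cases h : f ≤ r
    · rw [dif_pos h]
      by_cases hd : n % f = 0
      · rw [if_pos hd]
        exact iff_of_true rfl ⟨f, le_rfl, h, by omega, hd⟩
      · rw [if_neg hd]
        rw [IH ((r + 1 - (f + 2)).toNat) (by omega) (f + 2) rfl]
        constructor
        · rintro ⟨g, h1, h2, h3, h4⟩
          exact ⟨g, by omega, h2, by omega, h4⟩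
        · rintro ⟨g, h1, h2, h3, h4⟩
          have hgf : g ≠ f := by intro he; rw [he] at h4; exact hd h4
          exact ⟨g, by omega, h2, by omega, h4⟩
    · rw [dif_neg h]
      constructor
      · intro hc; exact absurd hc (by simp)
      · rintro ⟨g, h1, h2, _, _⟩; omega

-- the inner marking loop preserves the array size
lemma size_foldl_mark (lo : Int) :
    ∀ (l : List Int) (c : Array Bool),
      (l.foldl (fun c m => c.setIfInBounds (m - lo).toNat true) c).size = c.size := by
  intro l
  induction l with
  | nil => intro c; rfl
  | cons a l IH =>
    intro c
    rw [List.foldl_cons, IH, Array.size_setIfInBounds]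

-- which cells one marking loop sets
lemma getD_foldl_mark (lo : Int) :
    ∀ (l : List Int) (c : Array Bool) (x : Nat),
      ((l.foldl (fun c m => c.setIfInBounds (m - lo).toNat true) c).getD x false = true ↔
        c.getD x false = true ∨ ∃ m ∈ l, (m - lo).toNat = x ∧ x < c.size) := by
  intro l
  induction l with
  | nil => intro c x; simp
  | cons a l IH =>
    intro c x
    rw [List.foldl_cons, IH, Array.size_setIfInBounds]
    have hset : (c.setIfInBounds (a - lo).toNat true).getD x false = true ↔
        ((a - lo).toNat = x ∧ x < c.size) ∨ c.getD x false = true := by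
      by_cases he : (a - lo).toNat = x
      · subst he
        by_cases hlt : (a - lo).toNat < c.size
        · simp [Array.getD_eq_getD_getElem?, hlt]
        · simp [Array.getD_eq_getD_getElem?, hlt]
      · simp [Array.getD_eq_getD_getElem?, he]
    rw [hset]
    constructor
    · rintro (⟨⟨he, hlt⟩ | h⟩ | ⟨m, hm, he, hlt⟩)
      · exact Or.inr ⟨a, List.mem_cons_self, he, hlt⟩
      · exact Or.inl h
      · exact Or.inr ⟨m, List.mem_cons_of_mem a hm, he, hlt⟩
    · rintro (h | ⟨m, hm, he, hlt⟩)
      · exact Or.inl (Or.inr h)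
      · rcases List.mem_cons.mp hm with rfl | hm'
        · exact Or.inl (Or.inl ⟨he, hlt⟩)
        · exact Or.inr ⟨m, hm', he, hlt⟩

-- which cells the nested marking loops set
lemma getD_sieve_foldl (lo n_max : Int) :
    ∀ (ps : List Int) (c : Array Bool) (x : Nat),
      ((ps.foldl
          (fun comp p => (PySem.List.pyRange (sieveStart lo p) (n_max + 1) p).foldl
            (fun c m => c.setIfInBounds (m - lo).toNat true) comp) c).getD x false = true ↔
        c.getD x false = true ∨ ∃ p ∈ ps, ∃ m ∈ PySem.List.pyRange (sieveStart lo p) (n_max + 1) p,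
          (m - lo).toNat = x ∧ x < c.size) := by
  intro ps
  induction ps with
  | nil => intro c x; simp
  | cons a ps IH =>
    intro c x
    rw [List.foldl_cons, IH, getD_foldl_mark, size_foldl_mark]
    constructor
    · rintro (⟨h | ⟨m, hm, he, hlt⟩⟩ | ⟨p, hp, m, hm, he, hlt⟩)
      · exact Or.inl h
      · exact Or.inr ⟨a, List.mem_cons_self, m, hm, he, hlt⟩
      · exact Or.inr ⟨p, List.mem_cons_of_mem a hp, m, hm, he, hlt⟩
    · rintro (h | ⟨p, hp, m, hm, he, hlt⟩)
      · exact Or.inl (Or.inl h)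
      · rcases List.mem_cons.mp hp with rfl | hp'
        · exact Or.inl (Or.inr ⟨m, hm, he, hlt⟩)
        · exact Or.inr ⟨p, hp', m, hm, he, hlt⟩

-- p divides the start of its marking range
lemma dvd_sieveStart (lo p : Int) : p ∣ sieveStart lo p := by
  unfold sieveStart
  rcases max_cases (p * p) ((PySem.Int.floordiv (lo + p - 1) p) * p) with ⟨h, _⟩ | ⟨h, _⟩
  · rw [h]; exact Dvd.intro p rfl
  · rw [h]; exact dvd_mul_left p _

-- the marking never starts below lo
lemma sieveStart_ge_lo (lo p : Int) (hp : 0 < p) : lo ≤ sieveStart lo p := by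
  unfold sieveStart
  rw [PySem.Int.floordiv_eq_ediv_of_pos hp]
  have h1 := Int.mul_ediv_add_emod (lo + p - 1) p
  have h2 := Int.emod_nonneg (lo + p - 1) (by omega : p ≠ 0)
  have h3 := Int.emod_lt_of_pos (lo + p - 1) hp
  have h4 : lo ≤ (lo + p - 1) / p * p := by
    have : p * ((lo + p - 1) / p) = lo + p - 1 - (lo + p - 1) % p := by omega
    rw [mul_comm] at this
    omega
  exact le_trans h4 (le_max_right _ _)

-- the first marked multiple of p is ≤ any multiple of p in [lo, ∞) that is ≥ p*p
lemma sieveStart_le (lo p n : Int) (hp : 0 < p) (hlo : lo ≤ n) (hpp : p * p ≤ n)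
    (hdvd : p ∣ n) : sieveStart lo p ≤ n := by
  unfold sieveStart
  rw [PySem.Int.floordiv_eq_ediv_of_pos hp]
  obtain ⟨k, hk⟩ := hdvd
  have hq : (lo + p - 1) / p ≤ k := by
    have h1 : lo + p - 1 ≤ p - 1 + p * k := by omega
    have h2 : (lo + p - 1) / p ≤ (p - 1 + p * k) / p := Int.ediv_le_ediv hp h1
    have h3 : (p - 1 + p * k) / p = (p - 1) / p + k :=
      Int.add_mul_ediv_left _ _ (by omega : p ≠ 0)
    have h4 : (p - 1) / p = 0 := Int.ediv_eq_zero_of_lt (by omega) (by omega)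
    omega
  have hqp : (lo + p - 1) / p * p ≤ k * p :=
    mul_le_mul_of_nonneg_right hq (by omega)
  rw [max_le_iff]
  refine ⟨hpp, ?_⟩
  rw [hk, mul_comm p k]
  exact hqp

-- the sieve marks exactly the n in [lo, n_max] with a divisor p, 2 ≤ p, p*p ≤ n
lemma sieve_marks (lo n_max n : Int) (hlo : lo ≤ n) (hn : n ≤ n_max) (h0 : 0 ≤ n_max) :
    ((pvSieve lo n_max).getD (n - lo).toNat false = true ↔ ∃ p, 2 ≤ p ∧ p * p ≤ n ∧ p ∣ n) := by
  unfold pvSieve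
  rw [getD_sieve_foldl]
  have hbase : (Array.replicate (n_max - lo + 1).toNat false).getD (n - lo).toNat false = false := by
    rw [Array.getD_eq_getD_getElem?, Array.getElem?_replicate]
    by_cases h : (n - lo).toNat < (n_max - lo + 1).toNat
    · rw [if_pos h]; rfl
    · rw [if_neg h]; rfl
  rw [hbase]
  constructor
  · rintro (h | ⟨p, hp, m, hm, he, _⟩)
    · exact absurd h (by simp)
    · have hp' := (PySem.List.mem_pyRange_one).mp hp
      have hp2 : 2 ≤ p := hp'.1
      have hppos : (0 : Int) < p := by omega
      have hm' := (PySem.List.mem_pyRange_iff_of_pos hppos m).mp hm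
      have hmlo : lo ≤ m := le_trans (sieveStart_ge_lo lo p hppos) hm'.1
      have hmn : m = n := by omega
      have hdvds : p ∣ sieveStart lo p := dvd_sieveStart lo p
      have hdm : p ∣ m := by
        have := dvd_add hm'.2.2 hdvds
        simpa using this
      have hstart : p * p ≤ sieveStart lo p := le_max_left _ _
      exact ⟨p, hp2, by omega, hmn ▸ hdm⟩
  · rintro ⟨p, hp2, hpp, hdvd⟩
    have hppos : (0 : Int) < p := by omega
    have hps : p ≤ pvIsqrt n_max := by
      rw [le_pvIsqrt_iff n_max p h0 (by omega)]
      omega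
    have hstart : sieveStart lo p ≤ n := sieveStart_le lo p n hppos hlo hpp hdvd
    refine Or.inr ⟨p, ?_, n, ?_, rfl, ?_⟩
    · exact (PySem.List.mem_pyRange_one).mpr ⟨hp2, by omega⟩
    · refine (PySem.List.mem_pyRange_iff_of_pos hppos n).mpr ⟨hstart, by omega, ?_⟩
      exact dvd_sub hdvd (dvd_sieveStart lo p)
    · rw [Array.size_replicate]; omega

-- B's per-element keep condition (the filter predicate of the port)
def pB (lo n_max n : Int) : Bool :=
  (n % 2 != 0) && (n % 3 != 0) && (n % 5 != 0) && (pvSieve lo n_max).getD (n - lo).toNat false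

-- the two keep conditions agree on [lo, n_max] whenever 2 ≤ lo
lemma pA_eq_pB (lo n_max n : Int) (h2lo : 2 ≤ lo) (hlo : lo ≤ n) (hn : n ≤ n_max) :
    pA n = pB lo n_max n := by
  by_cases hm : n % 2 = 0 ∨ n % 3 = 0 ∨ n % 5 = 0
  · have hA : pA n = false := by
      unfold pA; rw [if_neg (show ¬ n < 2 by omega), if_pos hm]
    have hB : pB lo n_max n = false := by
      unfold pB
      rcases hm with h | h | h
      · rw [show (n % 2 != 0) = false by simp [h]]; simp
      · rw [show (n % 3 != 0) = false by simp [h]]; simp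
      · rw [show (n % 5 != 0) = false by simp [h]]; simp
    rw [hA, hB]
  · have h2 : ¬ n % 2 = 0 := fun h => hm (Or.inl h)
    have h3 : ¬ n % 3 = 0 := fun h => hm (Or.inr (Or.inl h))
    have h5 : ¬ n % 5 = 0 := fun h => hm (Or.inr (Or.inr h))
    have h7 : 7 ≤ n := by
      by_contra h
      have h2n : 2 ≤ n := by omega
      have h' : n < 7 := not_le.mp h
      interval_cases n <;> omega
    have hA : pA n = !isPrimeLoop n (pvIsqrt n) 3 := by
      unfold pA is_prime
      rw [if_neg (show ¬ n < 2 by omega), if_neg hm, if_neg (show ¬ n < 2 by omega),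
          if_neg (show ¬ (n = 2 ∨ n = 3) by omega), if_neg h2]
    have hB : pB lo n_max n = (pvSieve lo n_max).getD (n - lo).toNat false := by
      unfold pB
      rw [show (n % 2 != 0) = true by simp [h2], show (n % 3 != 0) = true by simp [h3],
          show (n % 5 != 0) = true by simp [h5]]
      simp
    rw [hA, hB]
    have hAc := isPrimeLoop_false_iff n (pvIsqrt n) ((pvIsqrt n + 1 - 3).toNat) 3 rfl
    have hmarks := sieve_marks lo n_max n hlo hn (by omega)
    -- bridge: ∃ odd g, 3 ≤ g ≤ isqrt n, n % g = 0  ↔  ∃ p, 2 ≤ p, p*p ≤ n, p ∣ n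
    have hbr : (∃ g, 3 ≤ g ∧ g ≤ pvIsqrt n ∧ (g - 3) % 2 = 0 ∧ n % g = 0) ↔
        (∃ p, 2 ≤ p ∧ p * p ≤ n ∧ p ∣ n) := by
      constructor
      · rintro ⟨g, hg3, hgr, _, hgm⟩
        exact ⟨g, by omega, (le_pvIsqrt_iff n g (by omega) (by omega)).mp hgr,
          Int.dvd_of_emod_eq_zero hgm⟩
      · rintro ⟨p, hp2, hpp, hdvd⟩
        have hpodd : p % 2 = 1 := by
          rcases Int.emod_two_eq_zero_or_one p with h | h
          · exfalso
            exact h2 (Int.emod_eq_zero_of_dvd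
              (dvd_trans (Int.dvd_of_emod_eq_zero h) hdvd))
          · exact h
        exact ⟨p, by omega, (le_pvIsqrt_iff n p (by omega) (by omega)).mpr hpp,
          by omega, Int.emod_eq_zero_of_dvd hdvd⟩
    cases hx : isPrimeLoop n (pvIsqrt n) 3 <;>
      cases hy : (pvSieve lo n_max).getD (n - lo).toNat false
    · exfalso
      have h1 := hbr.mp (hAc.mp hx)
      have h2' := hmarks.mpr h1
      rw [hy] at h2'
      exact absurd h2' (by simp)
    · rfl
    · rfl
    · exfalso
      have h1 := hmarks.mp hy
      have h2' := hAc.mpr (hbr.mpr h1)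
      rw [hx] at h2'
      exact absurd h2' (by simp)

-- dropping an all-filtered-out prefix of the range
lemma filter_pyRange_drop (M b : Int) :
    ∀ (k : Nat) (a : Int), a ≤ b → (b - a).toNat = k →
      (∀ x, a ≤ x → x < b → pA x = false) →
      (PySem.List.pyRange a M 1).filter pA = (PySem.List.pyRange b M 1).filter pA := by
  intro k
  induction k with
  | zero =>
    intro a h1 h2 _
    have : a = b := by omega
    rw [this]
  | succ k IH =>
    intro a h1 h2 h3
    have hab : a < b := by omega
    by_cases hM : a < M
    · rw [PySem.List.pyRange_one_cons hM]
      rw [List.filter_cons_of_neg (by rw [h3 a le_rfl hab]; exact Bool.false_ne_true)]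
      exact IH (a + 1) (by omega) (by omega) (fun x hx1 hx2 => h3 x (by omega) hx2)
    · rw [PySem.List.pyRange_one_eq_nil (by omega), PySem.List.pyRange_one_eq_nil (by omega)]

-- A's fold is a filter
lemma A_eq_filter (primes : List Int) (n_min n_max : Int) :
    control_set_same_local_exclusions primes n_min n_max =
      (PySem.List.pyRange n_min (n_max + 1) 1).filter pA := by
  unfold control_set_same_local_exclusions
  have hfun : (fun (out : List Int) (n : Int) =>
      if n < 2 then out
      else if n % 2 = 0 ∨ n % 3 = 0 ∨ n % 5 = 0 then out
      else if !is_prime n then out ++ [n] else out) =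
      fun (out : List Int) (n : Int) => if pA n then out ++ [n] else out := by
    funext out n
    by_cases h1 : n < 2
    · have hp : pA n = false := by unfold pA; rw [if_pos h1]
      rw [if_pos h1, hp]
      simp
    · by_cases h2 : n % 2 = 0 ∨ n % 3 = 0 ∨ n % 5 = 0
      · have hp : pA n = false := by unfold pA; rw [if_neg h1, if_pos h2]
        rw [if_neg h1, if_pos h2, hp]
        simp
      · have hp : pA n = !is_prime n := by unfold pA; rw [if_neg h1, if_neg h2]
        rw [if_neg h1, if_neg h2, hp]
  rw [hfun, PySem.List.foldl_append_if_eq_filter]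
  simp

-- ===== VERDICT (by name: the statement is the Claim_ definition above) =====
theorem control_set_same_local_exclusions_spec : Claim_equal_control_set_same_local_exclusions := by
  intro primes n_min n_max _hdom
  unfold Spec_control_set_same_local_exclusions
  rw [A_eq_filter]
  unfold control_set_same_local_exclusions_alt
  by_cases hempty : n_max < max n_min 2
  · rw [if_pos hempty]
    rw [List.filter_eq_nil_iff]
    intro x hx
    have hm := (PySem.List.mem_pyRange_one).mp hx
    have hx2 : x < 2 := by omega
    unfold pA
    rw [if_pos hx2]
    simp
  · rw [if_neg hempty]
    have h2lo : 2 ≤ max n_min 2 := le_max_right _ _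
    have hstep1 : (PySem.List.pyRange n_min (n_max + 1) 1).filter pA =
        (PySem.List.pyRange (max n_min 2) (n_max + 1) 1).filter pA := by
      rcases (show 2 ≤ n_min ∨ n_min < 2 by omega) with h | h
      · rw [max_eq_left (by omega)]
      · rw [max_eq_right (by omega)]
        exact filter_pyRange_drop (n_max + 1) 2 ((2 - n_min).toNat) n_min (by omega) rfl
          (fun x _ hx2 => by unfold pA; rw [if_pos (by omega)])
    rw [hstep1]
    apply List.filter_congr
    intro x hx
    have hmem := (PySem.List.mem_pyRange_one).mp hx
    exact pA_eq_pB (max n_min 2) n_max x h2lo hmem.1 (by omega)
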